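-- pv_equiv track=rewrite | github.com/od0015058-glitch/biuecfybyicwyncafciefaciwucyefaaiaciwy | i18n_po.py | _unescape_po_string
-- ===== SOURCE A (Python) =====
-- def _unescape_po_string(s: str) -> str:
--     """Inverse of :func:`_escape_po_string`."""
--     out: list[str] = []
--     i = 0
--     while i < len(s):
--         ch = s[i]
--         if ch == "\\" and i + 1 < len(s):
--             nxt = s[i + 1]
--             if nxt == "n":
--                 out.append("\n")
--             elif nxt == "t":
--                 out.append("\t")
--             elif nxt == "\\":
--                 out.append("\\")
--             elif nxt == "\"":
--                 out.append("\"")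
--             else:
--                 # Unknown escape — preserve the backslash and the
--                 # following char rather than swallowing it. Matches
--                 # Python's behaviour for unknown ``\\X`` sequences in
--                 # raw input.
--                 out.append(ch)
--                 out.append(nxt)
--             i += 2
--         else:
--             out.append(ch)
--             i += 1
--     return "".join(out)
-- ===== SOURCE B (Python) =====
-- _UNESC = {"n": "\n", "t": "\t", "\"": "\""}
--
-- def _unescape_po_string(s: str) -> str:
--     # Staged approach: split on every backslash, then rejoin the pieces,
--     # decoding the first character of each non-initial piece; an empty
--     # piece means two adjacent backslashes (or a trailing one).
--     parts = s.split("\\")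
--     out = [parts[0]]
--     i = 1
--     n = len(parts)
--     while i < n:
--         p = parts[i]
--         if p:
--             out.append(_UNESC.get(p[0], "\\" + p[0]))
--             out.append(p[1:])
--             i += 1
--         elif i + 1 < n:
--             out.append("\\")
--             out.append(parts[i + 1])
--             i += 2
--         else:
--             out.append("\\")
--             i += 1
--     return "".join(out)
-- ===== Notes on version B (the rewrite author's own statement) =====
-- stated objective: faster
-- what changed: Replaced the char-by-char scan with lookahead by a staged split-then-rejoin: split the string on every backslash, emit the first piece verbatim, then decode the first character of each following piece (an empty piece encodes adjacent or trailing backslashes).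
import Mathlib
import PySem

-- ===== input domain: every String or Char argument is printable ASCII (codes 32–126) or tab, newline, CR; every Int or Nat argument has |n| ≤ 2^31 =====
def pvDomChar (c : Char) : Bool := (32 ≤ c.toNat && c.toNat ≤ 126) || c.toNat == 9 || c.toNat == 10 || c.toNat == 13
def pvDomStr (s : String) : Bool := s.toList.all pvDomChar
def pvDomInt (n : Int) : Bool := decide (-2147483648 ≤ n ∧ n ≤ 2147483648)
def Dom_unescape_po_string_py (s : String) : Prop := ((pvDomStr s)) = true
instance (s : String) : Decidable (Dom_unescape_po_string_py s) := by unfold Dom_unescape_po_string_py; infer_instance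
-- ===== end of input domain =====

-- B replaces A's single char-by-char scan with lookahead by a staged algorithm: split the string on
-- every backslash, then rejoin, decoding the first char of each non-initial piece; objective: faster (measured:
-- the split runs in C instead of a per-character Python loop).

-- ===== PORT A =====
-- A's while loop over index i with lookahead s[i+1], as structural recursion with lookahead.
def pvUnescA : List Char → List Char
  | [] => []
  | c :: rest =>
    if c = '\\' then
      match rest with
      | nxt :: rest' =>
        (if nxt = 'n' then ['\n']
         else if nxt = 't' then ['\t']
         else if nxt = '\\' then ['\\']
         else if nxt = '"' then ['"']
         else [c, nxt]) ++ pvUnescA rest'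
      | [] => c :: pvUnescA []
    else c :: pvUnescA rest

def unescape_po_string_py (s : String) : String := String.ofList (pvUnescA s.toList)

-- ===== PORT B =====
-- s.split("\\") of Source B: returns (parts[0], parts[1:]) — the first piece and the remaining pieces.
def pvSplitB : List Char → List Char × List (List Char)
  | [] => ([], [])
  | c :: rest =>
    let (p, ps) := pvSplitB rest
    if c = '\\' then ([], p :: ps) else (c :: p, ps)

-- the _UNESC translation of the first char of a piece: _UNESC.get(c, "\\" + c)
def pvMapB (c : Char) : List Char :=
  if c = 'n' then ['\n'] else if c = 't' then ['\t'] else if c = '"' then ['"'] else ['\\', c]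

-- Source B's while loop over parts[1:]: a nonempty piece decodes its first char; an empty piece not in
-- last position stands for an escaped backslash followed by a literal piece; an empty last piece is
-- a trailing backslash.
def pvProcB : List (List Char) → List Char
  | [] => []
  | (c :: cs) :: ps => pvMapB c ++ cs ++ pvProcB ps
  | [] :: q :: ps => '\\' :: q ++ pvProcB ps
  | [] :: [] => ['\\']

def unescape_po_string_py_alt (s : String) : String :=
  let (p, ps) := pvSplitB s.toList
  String.ofList (p ++ pvProcB ps)

-- ===== PRECONDITION & SPEC =====
def Spec_unescape_po_string_py (s : String) (out : String) : Prop := out = unescape_po_string_py_alt s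
instance (s : String) (out : String) : Decidable (Spec_unescape_po_string_py s out) := by unfold Spec_unescape_po_string_py; infer_instance

-- ===== CLAIM (what is proved, stated in full; the proofs are below) =====
def Claim_equal_unescape_po_string_py : Prop := ∀ (s : String), Dom_unescape_po_string_py s → Spec_unescape_po_string_py s (unescape_po_string_py s)

-- ===== LEMMAS AND PROOFS =====

-- re-join the tail pieces with their separating backslashes
def pvJoinTail : List (List Char) → List Char
  | [] => []
  | q :: ps => '\\' :: q ++ pvJoinTail ps

-- splitting then rejoining reconstructs the string
theorem pvSplitB_join (l : List Char) : l = (pvSplitB l).1 ++ pvJoinTail (pvSplitB l).2 := by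
  induction l with
  | nil => simp [pvSplitB, pvJoinTail]
  | cons c rest ih =>
      by_cases h : c = '\\' <;> simp [pvSplitB, h, pvJoinTail] <;> exact ih

-- no piece produced by the split contains a backslash
theorem pvSplitB_noslash (l : List Char) :
    '\\' ∉ (pvSplitB l).1 ∧ ∀ q ∈ (pvSplitB l).2, '\\' ∉ q := by
  induction l with
  | nil => simp [pvSplitB]
  | cons c rest ih =>
      by_cases h : c = '\\' <;> simp [pvSplitB, h]
      · exact ⟨ih.1, ih.2⟩
      · exact ⟨⟨fun e => h e.symm, ih.1⟩, ih.2⟩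

-- A's scan passes over a backslash-free prefix verbatim
theorem pvUnescA_noslash (p l : List Char) (hp : '\\' ∉ p) :
    pvUnescA (p ++ l) = p ++ pvUnescA l := by
  induction p with
  | nil => simp
  | cons c cs ih =>
      simp only [List.mem_cons, not_or] at hp
      have hc : c ≠ '\\' := fun e => hp.1 e.symm
      rw [List.cons_append, pvUnescA.eq_def]
      simp [hc, ih hp.2]

-- A's scan at an escaped backslash
theorem pvUnescA_slashslash (l : List Char) :
    pvUnescA ('\\' :: '\\' :: l) = '\\' :: pvUnescA l := by
  rw [pvUnescA.eq_def]; simp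

-- A's scan at a backslash followed by a non-backslash char
theorem pvUnescA_slash (c : Char) (l : List Char) (hc : c ≠ '\\') :
    pvUnescA ('\\' :: c :: l) = pvMapB c ++ pvUnescA l := by
  rw [pvUnescA.eq_def]
  by_cases h1 : c = 'n' <;> by_cases h2 : c = 't' <;> by_cases h3 : c = '"' <;>
    simp_all [pvMapB]

-- on backslash-free pieces, B's loop computes A's scan of the rejoined tail
theorem pvProcB_eq (ps : List (List Char)) (h : ∀ q ∈ ps, '\\' ∉ q) :
    pvProcB ps = pvUnescA (pvJoinTail ps) := by
  induction ps using pvProcB.induct with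
  | case1 => simp [pvProcB, pvJoinTail, pvUnescA]
  | case2 c cs ps ih =>
      have hc : c ≠ '\\' := by
        intro e; exact (h (c :: cs) (by simp)) (by simp [e])
      have hcs : '\\' ∉ cs := by
        intro e; exact (h (c :: cs) (by simp)) (by simp [e])
      have hr := ih (fun q hq => h q (by simp [hq]))
      simp only [pvProcB, pvJoinTail, List.cons_append]
      rw [pvUnescA_slash c _ hc, pvUnescA_noslash cs _ hcs, hr, List.append_assoc]
  | case3 q ps ih =>
      have hq : '\\' ∉ q := h q (by simp)
      have hr := ih (fun r hrm => h r (by simp [hrm]))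
      simp only [pvProcB, pvJoinTail, List.nil_append, List.cons_append]
      rw [pvUnescA_slashslash, pvUnescA_noslash q _ hq, hr]
  | case4 =>
      rw [pvUnescA.eq_def]; simp [pvProcB, pvJoinTail, pvUnescA]

-- ===== VERDICT (by name: the statement is the Claim_ definition above) =====
theorem unescape_po_string_py_spec : Claim_equal_unescape_po_string_py := by
  intro s _
  unfold Spec_unescape_po_string_py unescape_po_string_py unescape_po_string_py_alt
  obtain ⟨h1, h2⟩ := pvSplitB_noslash s.toList
  rw [show pvUnescA s.toList
        = pvUnescA ((pvSplitB s.toList).1 ++ pvJoinTail (pvSplitB s.toList).2) from by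
      rw [← pvSplitB_join]]
  rw [pvUnescA_noslash _ _ h1, ← pvProcB_eq _ h2]
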